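-- pv_equiv track=rewrite | github.com/asbjorn-dev/python_eksamen | dictionary2.py | sales_volume_dictionary
-- ===== SOURCE A (Python) =====
-- def sales_volume_dictionary(d):
--     dictionary = {}
--     for row in d:
--         agent = row[1]
--         sales = row[2]
--
--         if agent in dictionary:
--             dictionary[agent]['total_sales'] += sales
--             dictionary[agent]['num_sales'] += 1
--         else:
--             dictionary[agent] = {'total_sales': sales, 'num_sales': 1}
--
--     return dictionary
-- ===== SOURCE B (Python) =====
-- def sales_volume_dictionary(d):
--     # Phase 1: group sales values by agent, preserving first-appearance order.
--     groups = {}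
--     for row in d:
--         groups.setdefault(row[1], []).append(row[2])
--     # Phase 2: reduce each group to its total and count.
--     return {agent: {'total_sales': sum(vals), 'num_sales': len(vals)}
--             for agent, vals in groups.items()}
-- ===== Notes on version B (the rewrite author's own statement) =====
-- stated objective: alternative
-- what changed: Replaces A's incremental if/else accumulation into nested dicts with a two-phase group-then-reduce: first build an agent->list-of-sales index, then map each group to {'total_sales': sum, 'num_sales': len}.
import Mathlib
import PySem

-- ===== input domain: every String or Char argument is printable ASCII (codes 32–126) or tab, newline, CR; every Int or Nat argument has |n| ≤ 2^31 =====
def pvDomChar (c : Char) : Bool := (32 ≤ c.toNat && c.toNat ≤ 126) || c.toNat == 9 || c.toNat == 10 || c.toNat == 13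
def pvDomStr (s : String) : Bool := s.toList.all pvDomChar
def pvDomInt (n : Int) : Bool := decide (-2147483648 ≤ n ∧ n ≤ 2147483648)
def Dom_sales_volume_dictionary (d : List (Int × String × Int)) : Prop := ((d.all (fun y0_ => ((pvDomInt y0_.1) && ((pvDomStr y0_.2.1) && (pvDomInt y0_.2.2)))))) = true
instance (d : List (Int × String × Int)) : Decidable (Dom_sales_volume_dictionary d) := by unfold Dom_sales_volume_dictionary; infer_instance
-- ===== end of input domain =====

-- B replaces A's incremental if/else accumulation with a two-phase group-then-reduce
-- (build agent -> list of sales, then map each group to total/count); same cost, different decomposition.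


-- ===== PORT A =====
-- one iteration of A's for-loop: in-place `+=` on the inner dict is Dict.modify
def svStepA (dict : PySem.Dict String (PySem.Dict String Int)) (row : Int × String × Int) :
    PySem.Dict String (PySem.Dict String Int) :=
  let agent := row.2.1
  let sales := row.2.2
  if dict.contains agent then
    dict.modify agent PySem.Dict.empty (fun inner =>
      (inner.modify "total_sales" 0 (· + sales)).modify "num_sales" 0 (· + 1))
  else
    dict.insert agent (PySem.Dict.ofList [("total_sales", sales), ("num_sales", 1)])

def sales_volume_dictionary (d : List (Int × String × Int)) : List (String × List (String × Int)) :=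
  ((d.foldl svStepA PySem.Dict.empty).items.map (fun p => (p.1, p.2.items)))

-- ===== PORT B =====
-- phase 1: groups.setdefault(row[1], []).append(row[2])
def svStepB (g : PySem.Dict String (List Int)) (row : Int × String × Int) :
    PySem.Dict String (List Int) :=
  g.modify row.2.1 [] (· ++ [row.2.2])

-- phase 2: the dict comprehension over groups.items()
def sales_volume_dictionary_alt (d : List (Int × String × Int)) : List (String × List (String × Int)) :=
  ((d.foldl svStepB PySem.Dict.empty).items.map
    (fun p => (p.1, [("total_sales", p.2.sum), ("num_sales", (p.2.length : Int))])))

-- ===== PRECONDITION & SPEC =====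
def Spec_sales_volume_dictionary (d : List (Int × String × Int)) (out : List (String × List (String × Int))) : Prop := out = sales_volume_dictionary_alt d
instance (d : List (Int × String × Int)) (out : List (String × List (String × Int))) : Decidable (Spec_sales_volume_dictionary d out) := by unfold Spec_sales_volume_dictionary; infer_instance

-- ===== CLAIM (what is proved, stated in full; the proofs are below) =====
def Claim_equal_sales_volume_dictionary : Prop := ∀ (d : List (Int × String × Int)), Dom_sales_volume_dictionary d → Spec_sales_volume_dictionary d (sales_volume_dictionary d)

-- ===== LEMMAS AND PROOFS =====

-- A's inner dict for a group whose encountered sales values are vs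
def svInner (vs : List Int) : PySem.Dict String Int :=
  ⟨[("total_sales", vs.sum), ("num_sales", (vs.length : Int))]⟩

-- the A-state corresponding to a B-state
def svToA (g : PySem.Dict String (List Int)) : PySem.Dict String (PySem.Dict String Int) :=
  ⟨g.items.map (fun p => (p.1, svInner p.2))⟩

lemma svToA_keys (g : PySem.Dict String (List Int)) : (svToA g).keys = g.keys := by
  simp [svToA, PySem.Dict.keys, List.map_map, Function.comp]

lemma svToA_contains (g : PySem.Dict String (List Int)) (a : String) :
    (svToA g).contains a = g.contains a := by
  simp only [svToA, PySem.Dict.contains, List.any_map]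
  rfl

lemma svInner_step (vs : List Int) (s : Int) :
    ((svInner vs).modify "total_sales" 0 (· + s)).modify "num_sales" 0 (· + 1)
      = svInner (vs ++ [s]) := by
  simp [svInner, PySem.Dict.modify, PySem.Dict.insert, PySem.Dict.getD, PySem.Dict.get?,
        PySem.Dict.contains]

lemma svOfList_pair (s : Int) :
    PySem.Dict.ofList [("total_sales", s), ("num_sales", (1:Int))] = svInner [s] := by
  apply PySem.Dict.ext
  simp [svInner, PySem.Dict.ofList, PySem.Dict.update, PySem.Dict.insert, PySem.Dict.contains,
        PySem.Dict.empty]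

lemma svToA_insert (g : PySem.Dict String (List Int)) (a : String) (ws : List Int) :
    (svToA g).insert a (svInner ws) = svToA (g.insert a ws) := by
  apply PySem.Dict.ext
  by_cases hc : g.contains a = true
  · rw [PySem.Dict.items_insert_of_contains _ _ ((svToA_contains g a).trans hc)]
    unfold svToA
    rw [PySem.Dict.items_insert_of_contains _ _ hc]
    simp only [List.map_map]
    apply List.map_congr_left
    intro p _
    by_cases h : (p.1 == a) = true <;> simp [Function.comp, h]
  · rw [PySem.Dict.items_insert_of_not_contains _ _ ((svToA_contains g a).trans (by simp [hc]))]
    unfold svToA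
    rw [PySem.Dict.items_insert_of_not_contains _ _ (by simp [hc])]
    simp

lemma svStep_comm (g : PySem.Dict String (List Int)) (row : Int × String × Int)
    (hn : g.keys.Nodup) : svStepA (svToA g) row = svToA (svStepB g row) := by
  obtain ⟨i, a, s⟩ := row
  have hB : svStepB g (i, a, s) = g.insert a (g.getD a [] ++ [s]) := rfl
  simp only [svStepA, svToA_contains]
  by_cases hc : g.contains a = true
  · simp only [hc, if_true]
    have hA : (svToA g).modify a PySem.Dict.empty (fun inner =>
          (inner.modify "total_sales" 0 (· + s)).modify "num_sales" 0 (· + 1))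
        = (svToA g).insert a ((((svToA g).getD a PySem.Dict.empty).modify "total_sales" 0
            (· + s)).modify "num_sales" 0 (· + 1)) := rfl
    have hsome : ∃ vs, g.get? a = some vs := by
      have := PySem.Dict.contains_eq_isSome_get? (d := g) (k := a)
      rw [hc] at this
      exact Option.isSome_iff_exists.mp this.symm
    obtain ⟨vs, hvs⟩ := hsome
    have hmem : (a, vs) ∈ g.items := PySem.Dict.mem_items_of_get?_eq_some _ hvs
    have hmemA : (a, svInner vs) ∈ (svToA g).items := by
      simpa [svToA] using List.mem_map_of_mem hmem (f := fun p => (p.1, svInner p.2))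
    have hgA : (svToA g).getD a PySem.Dict.empty = svInner vs :=
      PySem.Dict.getD_of_mem_items _ hmemA (by rw [svToA_keys]; exact hn) _
    have hgB : g.getD a [] = vs := by simp [PySem.Dict.getD, hvs]
    rw [hA, hgA, svInner_step, hB, hgB, svToA_insert]
  · simp only [hc]
    rw [hB, PySem.Dict.getD_of_not_contains g ([] : List Int) (by simp [hc]),
        svOfList_pair, svToA_insert]
    simp

lemma svStepB_nodup (g : PySem.Dict String (List Int)) (row : Int × String × Int)
    (hn : g.keys.Nodup) : (svStepB g row).keys.Nodup := by
  simp only [svStepB, PySem.Dict.modify]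
  exact PySem.Dict.nodup_keys_insert _ _ _ hn

lemma svLoop_comm (l : List (Int × String × Int)) (g : PySem.Dict String (List Int))
    (hn : g.keys.Nodup) : l.foldl svStepA (svToA g) = svToA (l.foldl svStepB g) := by
  induction l generalizing g with
  | nil => rfl
  | cons r t ih =>
    simp only [List.foldl_cons]
    rw [svStep_comm g r hn]
    exact ih _ (svStepB_nodup g r hn)

-- ===== VERDICT (by name: the statement is the Claim_ definition above) =====
theorem sales_volume_dictionary_spec : Claim_equal_sales_volume_dictionary := by
  intro d _
  unfold Spec_sales_volume_dictionary sales_volume_dictionary sales_volume_dictionary_alt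
  have h0 : (PySem.Dict.empty : PySem.Dict String (PySem.Dict String Int))
      = svToA PySem.Dict.empty := rfl
  rw [h0, svLoop_comm d PySem.Dict.empty (by simp [PySem.Dict.keys, PySem.Dict.empty])]
  simp [svToA, svInner, List.map_map, Function.comp]
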